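-- pv_equiv track=rewrite | github.com/ffyycc/Artificial_Intelligence_Projects | cs440_mp4/baseline.py | create_word_tag_table
-- ===== SOURCE A (Python) =====
-- def create_word_tag_table(data):
--     word_table = {}
--     tag_table = {}
--     for sentence in data:
--         for word in sentence:
--             w = word[0]
--             tag = word[1]
--             if ((tag != "START" and tag != "END")): #remove START and END tags in tag_table)
--                 if (tag not in tag_table):
--                         tag_table[tag] = 1
--                 else:
--                         tag_table[tag] += 1
--
--                 if (w not in word_table):   # word in word table
--                         word_table[w] = {}
--                         word_table[w][tag] = 1
--                 else:                       # word in word table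
--                    if (tag not in word_table[w]):
--                         word_table[w][tag] = 1
--                    else:
--                         word_table[w][tag] += 1
--     return word_table,tag_table
-- ===== SOURCE B (Python) =====
-- def create_word_tag_table(data):
--     # Pass 1: flat counters of (word, tag) pairs and of tags, skipping START/END.
--     pair_counts = {}
--     tag_counts = {}
--     for sentence in data:
--         for w, tag in sentence:
--             if tag == "START" or tag == "END":
--                 continue
--             pair_counts[(w, tag)] = pair_counts.get((w, tag), 0) + 1
--             tag_counts[tag] = tag_counts.get(tag, 0) + 1
--     # Pass 2: reshape the flat (word, tag) -> count table into the nested table.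
--     word_table = {}
--     for (w, tag), c in pair_counts.items():
--         word_table.setdefault(w, {})[tag] = c
--     return word_table, tag_counts
-- ===== Notes on version B (the rewrite author's own statement) =====
-- stated objective: alternative
-- what changed: Instead of growing the nested word->tag->count dict incrementally during the scan, B builds a flat (word,tag)->count counter and a tag counter in one pass, then reshapes the flat counter into the nested word_table in a second pass over its items.
import Mathlib
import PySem

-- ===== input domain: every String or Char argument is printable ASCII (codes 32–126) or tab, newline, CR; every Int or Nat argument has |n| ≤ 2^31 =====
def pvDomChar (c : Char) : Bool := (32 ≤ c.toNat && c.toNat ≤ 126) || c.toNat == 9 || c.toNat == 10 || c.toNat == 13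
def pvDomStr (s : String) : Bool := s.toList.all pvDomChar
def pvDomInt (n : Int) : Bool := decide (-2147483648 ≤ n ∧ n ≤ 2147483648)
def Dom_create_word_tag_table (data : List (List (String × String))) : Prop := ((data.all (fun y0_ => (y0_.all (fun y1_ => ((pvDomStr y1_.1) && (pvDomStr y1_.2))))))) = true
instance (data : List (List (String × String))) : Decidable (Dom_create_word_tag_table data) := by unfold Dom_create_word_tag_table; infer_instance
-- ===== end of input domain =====

-- B replaces A's incremental nested-dict build with a flat (word,tag) counter that is
-- reshaped into the nested table in a second pass (alternative decomposition, same cost).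


-- ===== PORT A =====
-- the body of A's inner loop: update tag_table, then the nested word_table, in place
def pvStepA (st : PySem.Dict String (PySem.Dict String Int) × PySem.Dict String Int)
    (word : String × String) : PySem.Dict String (PySem.Dict String Int) × PySem.Dict String Int :=
  let w := word.1
  let tag := word.2
  if tag ≠ "START" ∧ tag ≠ "END" then
    let tag_table :=
      if st.2.contains tag = false then st.2.insert tag 1
      else st.2.modify tag 0 (· + 1)
    let word_table :=
      if st.1.contains w = false then
        st.1.insert w ((PySem.Dict.empty).insert tag 1)
      else
        st.1.modify w PySem.Dict.empty (fun inner =>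
          if inner.contains tag = false then inner.insert tag 1
          else inner.modify tag 0 (· + 1))
    (word_table, tag_table)
  else st

def create_word_tag_table (data : List (List (String × String))) :
    (List (String × List (String × Int))) × (List (String × Int)) :=
  let st := data.foldl (fun st sentence => sentence.foldl pvStepA st)
    ((PySem.Dict.empty : PySem.Dict String (PySem.Dict String Int)),
     (PySem.Dict.empty : PySem.Dict String Int))
  (st.1.items.map (fun p => (p.1, p.2.items)), st.2.items)

-- ===== PORT B =====
-- pass 1 body: flat (word,tag) counter and tag counter, skipping START/END
def pvStepB (st : PySem.Dict (String × String) Int × PySem.Dict String Int)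
    (word : String × String) : PySem.Dict (String × String) Int × PySem.Dict String Int :=
  if word.2 = "START" ∨ word.2 = "END" then st
  else (st.1.insert (word.1, word.2) (st.1.getD (word.1, word.2) 0 + 1),
        st.2.insert word.2 (st.2.getD word.2 0 + 1))

-- pass 2: reshape the flat counter into the nested table (word_table.setdefault(w,{})[tag] = c)
def pvReshape (pairs : PySem.Dict (String × String) Int) : PySem.Dict String (PySem.Dict String Int) :=
  pairs.items.foldl
    (fun wt p => wt.insert p.1.1 ((wt.getD p.1.1 PySem.Dict.empty).insert p.1.2 p.2))
    PySem.Dict.empty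

def create_word_tag_table_alt (data : List (List (String × String))) :
    (List (String × List (String × Int))) × (List (String × Int)) :=
  let st := data.foldl (fun st sentence => sentence.foldl pvStepB st)
    ((PySem.Dict.empty : PySem.Dict (String × String) Int),
     (PySem.Dict.empty : PySem.Dict String Int))
  ((pvReshape st.1).items.map (fun p => (p.1, p.2.items)), st.2.items)

-- ===== PRECONDITION & SPEC =====
def Spec_create_word_tag_table (data : List (List (String × String))) (out : (List (String × List (String × Int))) × (List (String × Int))) : Prop := out = create_word_tag_table_alt data
instance (data : List (List (String × String))) (out : (List (String × List (String × Int))) × (List (String × Int))) : Decidable (Spec_create_word_tag_table data out) := by unfold Spec_create_word_tag_table; infer_instance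

-- ===== CLAIM (what is proved, stated in full; the proofs are below) =====
def Claim_equal_create_word_tag_table : Prop := ∀ (data : List (List (String × String))), Dom_create_word_tag_table data → Spec_create_word_tag_table data (create_word_tag_table data)

-- ===== LEMMAS AND PROOFS =====

-- the unguarded, uniform word-table step both programs reduce to
def pvUW (W : PySem.Dict String (PySem.Dict String Int)) (x : String × String) :
    PySem.Dict String (PySem.Dict String Int) :=
  W.insert x.1 ((W.getD x.1 PySem.Dict.empty).insert x.2
    ((W.getD x.1 PySem.Dict.empty).getD x.2 0 + 1))

-- the unguarded tag step (common to both programs)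
def pvUT (T : PySem.Dict String Int) (x : String × String) : PySem.Dict String Int :=
  T.insert x.2 (T.getD x.2 0 + 1)

-- the unguarded pair-counter step of B
def pvUP (P : PySem.Dict (String × String) Int) (x : String × String) :
    PySem.Dict (String × String) Int :=
  P.insert x (P.getD x 0 + 1)

-- reshape as a fold over an arbitrary item list
def pvReshL (L : List ((String × String) × Int)) : PySem.Dict String (PySem.Dict String Int) :=
  L.foldl (fun wt p => wt.insert p.1.1 ((wt.getD p.1.1 PySem.Dict.empty).insert p.1.2 p.2))
    PySem.Dict.empty

theorem pvReshL_append (L : List ((String × String) × Int)) (q : (String × String) × Int) :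
    pvReshL (L ++ [q])
      = (pvReshL L).insert q.1.1 (((pvReshL L).getD q.1.1 PySem.Dict.empty).insert q.1.2 q.2) := by
  simp [pvReshL, List.foldl_append]

theorem pvReshL_append' (L : List ((String × String) × Int)) (a b : String) (v : Int) :
    pvReshL (L ++ [((a, b), v)])
      = (pvReshL L).insert a (((pvReshL L).getD a PySem.Dict.empty).insert b v) :=
  pvReshL_append L ((a, b), v)

theorem pvStepA_eq (st : PySem.Dict String (PySem.Dict String Int) × PySem.Dict String Int)
    (x : String × String) :
    pvStepA st x = if x.2 = "START" ∨ x.2 = "END" then st else (pvUW st.1 x, pvUT st.2 x) := by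
  rcases st with ⟨W, T⟩
  rcases x with ⟨w, t⟩
  by_cases h1 : t = "START"
  · simp [pvStepA, h1]
  by_cases h2 : t = "END"
  · simp [pvStepA, h2]
  rw [if_neg (by simp [h1, h2])]
  show pvStepA (W, T) (w, t) = (pvUW W (w, t), pvUT T (w, t))
  unfold pvStepA pvUW pvUT
  rw [if_pos ⟨h1, h2⟩]
  simp only [Prod.mk.injEq]
  constructor
  · -- word table component
    cases hw : W.contains w with
    | false =>
      rw [if_pos rfl, PySem.Dict.getD_of_not_contains _ _ hw]
      simp [PySem.Dict.getD_empty]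
    | true =>
      rw [if_neg (by simp)]
      simp only [PySem.Dict.modify]
      congr 1
      cases ht : (W.getD w PySem.Dict.empty).contains t with
      | false =>
        rw [if_pos rfl, PySem.Dict.getD_of_not_contains _ _ ht]
        norm_num
      | true => rw [if_neg (by simp)]
  · -- tag table component
    cases hT : T.contains t with
    | false =>
      rw [if_pos rfl, PySem.Dict.getD_of_not_contains _ _ hT]
      norm_num
    | true =>
      rw [if_neg (by simp)]
      rfl

theorem pvStepB_eq (st : PySem.Dict (String × String) Int × PySem.Dict String Int)
    (x : String × String) :
    pvStepB st x = if x.2 = "START" ∨ x.2 = "END" then st else (pvUP st.1 x, pvUT st.2 x) := by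
  rcases x with ⟨w, t⟩
  rfl

-- the last-occurrence lookup inside the reshaped inner dict
theorem pvReshL_get? (L : List ((String × String) × Int)) (w t : String) :
    ((pvReshL L).getD w PySem.Dict.empty).get? t
      = L.foldl (fun acc p => if p.1 = (w, t) then some p.2 else acc) none := by
  induction L using List.reverseRecOn with
  | nil => simp [pvReshL, PySem.Dict.getD_empty, PySem.Dict.get?_empty]
  | append_singleton L q ih =>
    rcases q with ⟨⟨q1, q2⟩, qv⟩
    rw [pvReshL_append', List.foldl_append]
    simp only [List.foldl_cons, List.foldl_nil]
    by_cases hw : w = q1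
    · subst hw
      rw [PySem.Dict.getD_insert_self]
      by_cases ht : t = q2
      · subst ht
        rw [PySem.Dict.get?_insert_self, if_pos rfl]
      · rw [PySem.Dict.get?_insert_of_ne _ _ ht, ih,
          if_neg (fun h => ht (congrArg Prod.snd h).symm)]
    · rw [PySem.Dict.getD_insert_of_ne _ _ _ hw, ih,
        if_neg (fun h => hw (congrArg Prod.fst h).symm)]

theorem pvFold_none (L : List ((String × String) × Int)) (w t : String)
    (h : ∀ p ∈ L, p.1 ≠ (w, t)) :
    L.foldl (fun acc p => if p.1 = (w, t) then some p.2 else acc) none = none := by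
  induction L with
  | nil => rfl
  | cons p L ih =>
    simp only [List.foldl_cons]
    rw [if_neg (h p (by simp))]
    exact ih (fun q hq => h q (by simp [hq]))

theorem pvFold_some (L : List ((String × String) × Int)) (w t : String) (v : Int)
    (hn : (L.map (·.1)).Nodup) (hm : ((w, t), v) ∈ L) :
    L.foldl (fun acc p => if p.1 = (w, t) then some p.2 else acc) none = some v := by
  induction L using List.reverseRecOn with
  | nil => simp at hm
  | append_singleton L q ih =>
    rw [List.map_append] at hn
    have hnL : (L.map (·.1)).Nodup := (List.nodup_append.mp hn).1
    have hqn : q.1 ∉ L.map (·.1) := by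
      intro hmem
      exact (List.nodup_append.mp hn).2.2 q.1 hmem q.1 (by simp) rfl
    rw [List.foldl_append]
    simp only [List.foldl_cons, List.foldl_nil]
    by_cases hq : q.1 = (w, t)
    · rw [if_pos hq]
      rcases List.mem_append.mp hm with hL | hq'
      · exfalso
        have hm' : ((w, t) : String × String) ∈ L.map (·.1) := List.mem_map_of_mem hL
        rw [hq] at hqn
        exact hqn hm'
      · simp only [List.mem_singleton] at hq'
        rw [← hq']
    · rw [if_neg hq]
      have hL : ((w, t), v) ∈ L := by
        rcases List.mem_append.mp hm with h | h
        · exact h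
        · exfalso
          simp only [List.mem_singleton] at h
          exact hq (congrArg Prod.fst h.symm)
      exact ih hnL hL

theorem pvReshL_contains (L : List ((String × String) × Int)) (w : String) :
    (pvReshL L).contains w = L.any (fun p => p.1.1 == w) := by
  induction L using List.reverseRecOn with
  | nil => simp [pvReshL, PySem.Dict.contains_empty]
  | append_singleton L q ih =>
    rw [pvReshL_append, PySem.Dict.contains_insert, ih, List.any_append,
      Bool.or_comm]
    simp only [List.any_cons, List.any_nil, Bool.or_false]
    congr 1
    by_cases h : w = q.1.1
    · simp [h]
    · have h' : ¬ q.1.1 = w := fun e => h e.symm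
      rw [beq_eq_false_iff_ne.mpr h, beq_eq_false_iff_ne.mpr h']

-- a map that rewrites no element is the identity
theorem pvMap_id {α : Type} (L : List α) (f : α → α) (h : ∀ p ∈ L, f p = p) : L.map f = L := by
  induction L with
  | nil => rfl
  | cons p L ih =>
    simp only [List.map_cons]
    rw [h p (by simp), ih (fun q hq => h q (by simp [hq]))]

-- inserting the same key twice keeps only the second value
theorem pvInsert_insert_self {κ ν : Type} [BEq κ] [LawfulBEq κ]
    (d : PySem.Dict κ ν) (k : κ) (v v' : ν) :
    (d.insert k v).insert k v' = d.insert k v' := by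
  apply PySem.Dict.ext
  cases hc : d.contains k with
  | true =>
    rw [PySem.Dict.items_insert_of_contains (d.insert k v) v' (PySem.Dict.contains_insert_self d k v),
      PySem.Dict.items_insert_of_contains d v hc,
      PySem.Dict.items_insert_of_contains d v' hc, List.map_map]
    apply List.map_congr_left
    intro p _
    by_cases hpk : p.1 = k
    · simp [Function.comp, hpk]
    · simp [Function.comp, hpk]
  | false =>
    have hk : ∀ p ∈ d.items, p.1 ≠ k := by
      intro p hp hpk
      have hmem : k ∈ d.keys := by
        simp only [PySem.Dict.keys]
        exact hpk ▸ List.mem_map_of_mem hp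
      rw [(PySem.Dict.contains_iff_mem_keys d k).mpr hmem] at hc
      cases hc
    rw [PySem.Dict.items_insert_of_contains (d.insert k v) v' (PySem.Dict.contains_insert_self d k v),
      PySem.Dict.items_insert_of_not_contains d v hc,
      PySem.Dict.items_insert_of_not_contains d v' hc, List.map_append]
    rw [pvMap_id d.items _ (fun p hp => by simp [hk p hp])]
    simp

-- inserts at distinct keys commute when the first key is already present
theorem pvInsert_comm {κ ν : Type} [BEq κ] [LawfulBEq κ]
    (d : PySem.Dict κ ν) (k k' : κ) (v v' : ν) (hne : k ≠ k')
    (hc : d.contains k = true) :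
    (d.insert k v).insert k' v' = (d.insert k' v').insert k v := by
  apply PySem.Dict.ext
  have hck : (d.insert k' v').contains k = true := by
    rw [PySem.Dict.contains_insert]
    simp [hc]
  cases hk' : d.contains k' with
  | true =>
    have hck' : (d.insert k v).contains k' = true := by
      rw [PySem.Dict.contains_insert]
      simp [hk']
    rw [PySem.Dict.items_insert_of_contains (d.insert k v) v' hck',
      PySem.Dict.items_insert_of_contains d v hc,
      PySem.Dict.items_insert_of_contains (d.insert k' v') v hck,
      PySem.Dict.items_insert_of_contains d v' hk', List.map_map, List.map_map]
    apply List.map_congr_left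
    intro p _
    by_cases h1 : p.1 = k
    · have h2 : p.1 ≠ k' := h1 ▸ hne
      simp [Function.comp, h1, hne]
    · by_cases h2 : p.1 = k'
      · simp [Function.comp, h2, Ne.symm hne]
      · simp [Function.comp, h1, h2]
  | false =>
    have hck' : (d.insert k v).contains k' = false := by
      rw [PySem.Dict.contains_insert]
      simp [hk', Ne.symm hne]
    rw [PySem.Dict.items_insert_of_not_contains (d.insert k v) v' hck',
      PySem.Dict.items_insert_of_contains d v hc,
      PySem.Dict.items_insert_of_contains (d.insert k' v') v hck,
      PySem.Dict.items_insert_of_not_contains d v' hk', List.map_append]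
    simp [Ne.symm hne]

theorem pvMap_noop (L : List ((String × String) × Int)) (w t : String) (c : Int)
    (h : ∀ p ∈ L, p.1 ≠ (w, t)) :
    L.map (fun p => if p.1 == (w, t) then ((w, t), c) else p) = L :=
  pvMap_id L _ (fun p hp => by simp [h p hp])

-- t is a key of the reshaped inner dict of w when (w,t) occurs among the flat keys
theorem pvInner_contains (L : List ((String × String) × Int)) (w t : String)
    (hn : (L.map (·.1)).Nodup) (hm : ((w, t) : String × String) ∈ L.map (·.1)) :
    ((pvReshL L).getD w PySem.Dict.empty).contains t = true := by
  obtain ⟨p, hp, hp1⟩ := List.mem_map.mp hm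
  have hv : ((w, t), p.2) ∈ L := by
    have hpe : ((w, t), p.2) = p := by
      rw [← hp1]
    rw [hpe]
    exact hp
  rw [PySem.Dict.contains_eq_isSome_get?, pvReshL_get?, pvFold_some L w t p.2 hn hv]
  rfl

theorem pvOuter_contains (L : List ((String × String) × Int)) (w t : String)
    (hm : ((w, t) : String × String) ∈ L.map (·.1)) :
    (pvReshL L).contains w = true := by
  rw [pvReshL_contains]
  obtain ⟨p, hp, hp1⟩ := List.mem_map.mp hm
  exact List.any_eq_true.mpr ⟨p, hp, by simp [hp1]⟩

theorem pvInner_getD_none (L : List ((String × String) × Int)) (w t : String)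
    (h : ∀ p ∈ L, p.1 ≠ (w, t)) :
    ((pvReshL L).getD w PySem.Dict.empty).getD t 0 = 0 := by
  rw [PySem.Dict.getD_eq_get?_getD, pvReshL_get?, pvFold_none L w t h]
  rfl

theorem pvInner_getD_some (L : List ((String × String) × Int)) (w t : String) (v : Int)
    (hn : (L.map (·.1)).Nodup) (hv : ((w, t), v) ∈ L) :
    ((pvReshL L).getD w PySem.Dict.empty).getD t 0 = v := by
  rw [PySem.Dict.getD_eq_get?_getD, pvReshL_get?, pvFold_some L w t v hn hv]
  rfl

-- updating the count of an existing (w,t) pair in the flat list updates it in place in the reshape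
theorem pvReshL_update (L : List ((String × String) × Int)) (w t : String) (c : Int)
    (hn : (L.map (·.1)).Nodup) (hm : ((w, t) : String × String) ∈ L.map (·.1)) :
    pvReshL (L.map (fun p => if p.1 == (w, t) then ((w, t), c) else p))
      = (pvReshL L).insert w (((pvReshL L).getD w PySem.Dict.empty).insert t c) := by
  induction L using List.reverseRecOn with
  | nil => simp at hm
  | append_singleton L q ih =>
    rcases q with ⟨⟨q1, q2⟩, qv⟩
    rw [List.map_append] at hn hm
    have hnL : (L.map (·.1)).Nodup := (List.nodup_append.mp hn).1
    have hqn : ((q1, q2) : String × String) ∉ L.map (·.1) := by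
      intro hmem
      exact (List.nodup_append.mp hn).2.2 (q1, q2) hmem (q1, q2) (by simp) rfl
    by_cases hq : ((q1, q2) : String × String) = (w, t)
    · injection hq with e1 e2
      subst e1
      subst e2
      have hLnoop : L.map (fun p => if p.1 == ((q1, q2) : String × String) then ((q1, q2), c) else p) = L :=
        pvMap_noop L q1 q2 c (fun p hp hpk => hqn (hpk ▸ List.mem_map_of_mem hp))
      rw [List.map_append, hLnoop]
      simp only [List.map_cons, List.map_nil]
      rw [if_pos (by simp : ((((q1, q2) : String × String), qv).1 == ((q1, q2) : String × String)) = true)]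
      rw [pvReshL_append', pvReshL_append', PySem.Dict.getD_insert_self,
        pvInsert_insert_self, pvInsert_insert_self]
    · have hmL : ((w, t) : String × String) ∈ L.map (·.1) := by
        rcases List.mem_append.mp hm with h | h
        · exact h
        · exfalso
          simp only [List.map_cons, List.map_nil, List.mem_singleton] at h
          exact hq h.symm
      rw [List.map_append]
      simp only [List.map_cons, List.map_nil]
      rw [if_neg (by simp [hq])]
      rw [pvReshL_append', pvReshL_append', ih hnL hmL]
      by_cases hw : q1 = w
      · subst hw
        have ht2 : t ≠ q2 := fun e => hq (by rw [e])
        rw [PySem.Dict.getD_insert_self, PySem.Dict.getD_insert_self,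
          pvInsert_insert_self, pvInsert_insert_self,
          pvInsert_comm ((pvReshL L).getD q1 PySem.Dict.empty) t q2 c qv ht2
            (pvInner_contains L q1 t hnL hmL)]
      · have hw' : w ≠ q1 := fun e => hw e.symm
        rw [PySem.Dict.getD_insert_of_ne _ _ _ hw, PySem.Dict.getD_insert_of_ne _ _ _ hw',
          pvInsert_comm (pvReshL L) w q1 _ _ hw' (pvOuter_contains L w t hmL)]

-- one pair-counter step corresponds to one uniform A step after reshaping
theorem pvStep_main (d : PySem.Dict (String × String) Int) (x : String × String)
    (hn : d.keys.Nodup) :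
    pvReshL (pvUP d x).items = pvUW (pvReshL d.items) x := by
  rcases x with ⟨w, t⟩
  have hnI : (d.items.map (·.1)).Nodup := by
    simpa only [PySem.Dict.keys] using hn
  unfold pvUP pvUW
  cases hc : d.contains (w, t) with
  | false =>
    have hkey : ∀ p ∈ d.items, p.1 ≠ ((w, t) : String × String) := by
      intro p hp hpk
      have hmem : ((w, t) : String × String) ∈ d.keys := by
        simp only [PySem.Dict.keys]
        exact hpk ▸ List.mem_map_of_mem hp
      rw [(PySem.Dict.contains_iff_mem_keys d _).mpr hmem] at hc
      cases hc
    rw [PySem.Dict.getD_of_not_contains _ _ hc,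
      PySem.Dict.items_insert_of_not_contains d _ hc, pvReshL_append',
      pvInner_getD_none d.items w t hkey]
  | true =>
    have hkm : ((w, t) : String × String) ∈ d.items.map (·.1) := by
      have hmem := (PySem.Dict.contains_iff_mem_keys d _).mp hc
      simpa only [PySem.Dict.keys] using hmem
    obtain ⟨p, hp, hp1⟩ := List.mem_map.mp hkm
    have hv : ((w, t), p.2) ∈ d.items := by
      have hpe : ((w, t), p.2) = p := by rw [← hp1]
      rw [hpe]
      exact hp
    have hget : d.getD (w, t) 0 = p.2 := PySem.Dict.getD_of_mem_items d hv hn 0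
    rw [hget, PySem.Dict.items_insert_of_contains d _ hc,
      pvReshL_update d.items w t (p.2 + 1) hnI hkm,
      pvInner_getD_some d.items w t p.2 hnI hv]

theorem pvMain (li : List (String × String)) :
    li.foldl pvUW PySem.Dict.empty = pvReshape (li.foldl pvUP PySem.Dict.empty) := by
  induction li using List.reverseRecOn with
  | nil => rfl
  | append_singleton li x ih =>
    rw [List.foldl_append, List.foldl_append]
    simp only [List.foldl_cons, List.foldl_nil]
    rw [ih]
    have he : li.foldl pvUP PySem.Dict.empty = PySem.Dict.counter li := rfl
    have hrk : (li.foldl pvUP PySem.Dict.empty).keys.Nodup := by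
      rw [he]
      exact PySem.Dict.nodup_keys_counter li
    exact (pvStep_main (li.foldl pvUP PySem.Dict.empty) x hrk).symm

-- ===== VERDICT (by name: the statement is the Claim_ definition above) =====
theorem create_word_tag_table_spec : Claim_equal_create_word_tag_table := by
  intro data _
  unfold Spec_create_word_tag_table create_word_tag_table create_word_tag_table_alt
  have hA : pvStepA = fun st (x : String × String) =>
      if x.2 = "START" ∨ x.2 = "END" then st else (pvUW st.1 x, pvUT st.2 x) :=
    funext fun st => funext fun x => pvStepA_eq st x
  have hB : pvStepB = fun st (x : String × String) =>
      if x.2 = "START" ∨ x.2 = "END" then st else (pvUP st.1 x, pvUT st.2 x) :=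
    funext fun st => funext fun x => pvStepB_eq st x
  rw [← List.foldl_flatten (f := pvStepA), ← List.foldl_flatten (f := pvStepB), hA, hB]
  have hgA : (fun (st : PySem.Dict String (PySem.Dict String Int) × PySem.Dict String Int)
        (x : String × String) =>
        if x.2 = "START" ∨ x.2 = "END" then st else (pvUW st.1 x, pvUT st.2 x))
      = fun st x => if (!(x.2 == "START" || x.2 == "END")) = true
        then (pvUW st.1 x, pvUT st.2 x) else st := by
    funext st x
    by_cases h1 : x.2 = "START" <;> by_cases h2 : x.2 = "END" <;> simp [h1, h2]
  have hgB : (fun (st : PySem.Dict (String × String) Int × PySem.Dict String Int)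
        (x : String × String) =>
        if x.2 = "START" ∨ x.2 = "END" then st else (pvUP st.1 x, pvUT st.2 x))
      = fun st x => if (!(x.2 == "START" || x.2 == "END")) = true
        then (pvUP st.1 x, pvUT st.2 x) else st := by
    funext st x
    by_cases h1 : x.2 = "START" <;> by_cases h2 : x.2 = "END" <;> simp [h1, h2]
  rw [hgA, hgB, ← List.foldl_filter, ← List.foldl_filter,
    PySem.List.foldl_prod_mk, PySem.List.foldl_prod_mk]
  rw [pvMain]
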